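-- pv_equiv track=rewrite | github.com/omit01/ProjectComputerProgramming | main.py | calculate_arrival_service_per_C
-- ===== SOURCE A (Python) =====
-- def calculate_arrival_service_per_C(arrivalrates, servicerates):
--     last_arrival = 0
--     last_service_start = 0
--     last_service_end = 0
--
--     arrival_times = []
--     service_start = []
--     service_finish = []
--
--     for n in range(len(arrivalrates)):
--         arrival_time = arrivalrates[n] + last_arrival
--         last_arrival = arrival_time
--         arrival_times.append(arrival_time)
--         if last_service_end <= last_arrival:
--             last_service_start = last_arrival
--         else:
--             last_service_start = last_service_end
--         last_service_end = last_service_start + servicerates[n]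
--         service_start.append(last_service_start)
--         service_finish.append(last_service_end)
--     return (arrival_times, service_start, service_finish)
-- ===== SOURCE B (Python) =====
-- def calculate_arrival_service_per_C(arrivalrates, servicerates):
--     # Arrival times: cumulative sums of the inter-arrival increments.
--     arrival_times = []
--     total = 0
--     for r in arrivalrates:
--         total += r
--         arrival_times.append(total)
--     # Lindley reformulation: finish[k] = T[k+1] + max_{j<=k}(arrival[j] - T[j]),
--     # where T[k] is the cumulative service time before customer k.  The running
--     # max slack m replaces the start = max(arrival, previous finish) recursion.
--     service_finish = []
--     T = 0
--     m = 0
--     for k in range(len(arrival_times)):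
--         m = max(m, arrival_times[k] - T)
--         T += servicerates[k]
--         service_finish.append(T + m)
--     # Starts are recovered from the finishes by subtraction.
--     service_start = [f - s for f, s in zip(service_finish, servicerates)]
--     return (arrival_times, service_start, service_finish)
-- ===== Notes on version B (the rewrite author's own statement) =====
-- stated objective: alternative
-- what changed: A's max(arrival, previous finish) recursion is replaced by the Lindley random-walk reformulation: after a prefix-sum pass for arrivals, finishes are computed as cumulative-service plus a running max of the slack (arrival[k] - cumulative service before k), and starts are recovered afterwards by subtracting each service time from its finish.
import Mathlib
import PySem

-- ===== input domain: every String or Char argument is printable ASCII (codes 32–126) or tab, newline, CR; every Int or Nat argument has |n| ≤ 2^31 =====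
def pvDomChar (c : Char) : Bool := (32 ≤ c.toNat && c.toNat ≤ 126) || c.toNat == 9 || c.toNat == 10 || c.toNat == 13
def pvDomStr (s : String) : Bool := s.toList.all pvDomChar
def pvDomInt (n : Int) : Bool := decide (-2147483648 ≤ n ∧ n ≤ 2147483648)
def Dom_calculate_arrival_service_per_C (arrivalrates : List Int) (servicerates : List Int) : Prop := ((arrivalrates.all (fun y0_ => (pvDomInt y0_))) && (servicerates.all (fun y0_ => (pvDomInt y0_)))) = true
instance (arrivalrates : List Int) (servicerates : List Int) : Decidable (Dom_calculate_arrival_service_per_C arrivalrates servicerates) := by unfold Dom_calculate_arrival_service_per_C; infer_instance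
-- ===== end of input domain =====

-- B replaces A's max(arrival, previous finish) recursion by the Lindley reformulation:
-- finishes = cumulative service + running max of arrival slack, starts recovered by
-- subtraction afterwards (objective: alternative).


-- ===== PORT A =====
-- 'for n in range(len(arrivalrates))' as a foldl over pyRange; arrivalrates[n] is always
-- in range, servicerates[n] is in range on Pre_ (out of range Python raises IndexError;
-- pyGetD's default 0 is never reached on Pre_).
def calculate_arrival_service_per_C (arrivalrates : List Int) (servicerates : List Int) : List Int × List Int × List Int :=
  let r := (PySem.List.pyRange 0 arrivalrates.length 1).foldl
    (fun (st : Int × Int × Int × List Int × List Int × List Int) n =>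
      let arrival_time := PySem.List.pyGetD arrivalrates n 0 + st.1
      let last_service_start := if st.2.2.1 ≤ arrival_time then arrival_time else st.2.2.1
      let last_service_end := last_service_start + PySem.List.pyGetD servicerates n 0
      (arrival_time, last_service_start, last_service_end,
       st.2.2.2.1 ++ [arrival_time], st.2.2.2.2.1 ++ [last_service_start], st.2.2.2.2.2 ++ [last_service_end]))
    (0, 0, 0, [], [], [])
  (r.2.2.2.1, r.2.2.2.2.1, r.2.2.2.2.2)

-- ===== PORT B =====
-- pass 1: prefix sums; pass 2: 'for k in range(len(arrival_times))' over the table with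
-- running (T, m); then the starts by a list comprehension over zip(service_finish, servicerates).
def calculate_arrival_service_per_C_alt (arrivalrates : List Int) (servicerates : List Int) : List Int × List Int × List Int :=
  let p := arrivalrates.foldl (fun (st : Int × List Int) r => (st.1 + r, st.2 ++ [st.1 + r])) (0, [])
  let arrival_times := p.2
  let q := (PySem.List.pyRange 0 arrival_times.length 1).foldl
    (fun (st : Int × Int × List Int) k =>
      let m := max st.2.1 (PySem.List.pyGetD arrival_times k 0 - st.1)
      let T := st.1 + PySem.List.pyGetD servicerates k 0
      (T, m, st.2.2 ++ [T + m]))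
    (0, 0, [])
  let service_finish := q.2.2
  (arrival_times, (service_finish.zip servicerates).map (fun x => x.1 - x.2), service_finish)

-- ===== PRECONDITION & SPEC =====
-- Python A raises IndexError at servicerates[n] when servicerates is shorter than arrivalrates (B raises there too).
def Pre_calculate_arrival_service_per_C (arrivalrates : List Int) (servicerates : List Int) : Prop :=
  arrivalrates.length ≤ servicerates.length
instance (arrivalrates : List Int) (servicerates : List Int) : Decidable (Pre_calculate_arrival_service_per_C arrivalrates servicerates) := by unfold Pre_calculate_arrival_service_per_C; infer_instance
def pvWitness_calculate_arrival_service_per_C : List Int × List Int := ([2, 1, 4], [3, 1, 1])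

def Spec_calculate_arrival_service_per_C (arrivalrates : List Int) (servicerates : List Int) (out : List Int × List Int × List Int) : Prop := out = calculate_arrival_service_per_C_alt arrivalrates servicerates
instance (arrivalrates : List Int) (servicerates : List Int) (out : List Int × List Int × List Int) : Decidable (Spec_calculate_arrival_service_per_C arrivalrates servicerates out) := by unfold Spec_calculate_arrival_service_per_C; infer_instance

-- ===== CLAIM (what is proved, stated in full; the proofs are below) =====
def Claim_equal_calculate_arrival_service_per_C : Prop := ∀ (arrivalrates : List Int) (servicerates : List Int), Dom_calculate_arrival_service_per_C arrivalrates servicerates → Pre_calculate_arrival_service_per_C arrivalrates servicerates → Spec_calculate_arrival_service_per_C arrivalrates servicerates (calculate_arrival_service_per_C arrivalrates servicerates)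

-- ===== LEMMAS AND PROOFS =====

-- proof-only names for loop bodies (defeq to the ports' lambdas)
def pvStepA (st : Int × Int × Int × List Int × List Int × List Int) (a s : Int) :
    Int × Int × Int × List Int × List Int × List Int :=
  (a + st.1, if st.2.2.1 ≤ a + st.1 then a + st.1 else st.2.2.1,
   (if st.2.2.1 ≤ a + st.1 then a + st.1 else st.2.2.1) + s,
   st.2.2.2.1 ++ [a + st.1],
   st.2.2.2.2.1 ++ [if st.2.2.1 ≤ a + st.1 then a + st.1 else st.2.2.1],
   st.2.2.2.2.2 ++ [(if st.2.2.1 ≤ a + st.1 then a + st.1 else st.2.2.1) + s])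

-- B's second-pass step on state (T, m, finishes)
def pvStepL (st : Int × Int × List Int) (a s : Int) : Int × Int × List Int :=
  (st.1 + s, max st.2.1 (a - st.1), st.2.2 ++ [st.1 + s + max st.2.1 (a - st.1)])

-- reference step: the explicit start = max(arrival, last_end) recursion
def pvStepR (st : Int × List Int × List Int) (x : Int × Int) : Int × List Int × List Int :=
  (max x.1 st.1 + x.2, st.2.1 ++ [max x.1 st.1], st.2.2 ++ [max x.1 st.1 + x.2])

-- prefix sums of the rates starting from running total `la`
def pvPrefixes (la : Int) : List Int → List Int
  | [] => []
  | a :: t => (la + a) :: pvPrefixes (la + a) t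

theorem pvPrefixes_length (ar : List Int) : ∀ la, (pvPrefixes la ar).length = ar.length := by
  induction ar with
  | nil => intro la; rfl
  | cons a t ih => intro la; simp [pvPrefixes, ih]

-- B's first pass computes (la + sum, acc ++ prefix sums)
theorem pvPrefix_fold (ar : List Int) : ∀ (la : Int) (acc : List Int),
    ar.foldl (fun (st : Int × List Int) r => (st.1 + r, st.2 ++ [st.1 + r])) (la, acc)
      = (la + ar.sum, acc ++ pvPrefixes la ar) := by
  induction ar with
  | nil => intro la acc; simp [pvPrefixes]
  | cons a t ih =>
    intro la acc
    simp only [List.foldl_cons, ih, pvPrefixes, List.sum_cons, List.append_assoc,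
      List.cons_append, List.nil_append]
    congr 1
    ring

-- an indexed loop over pyRange equals a fold over the zipped lists
theorem pvFold_range_two {S : Type} (xs ys : List Int) (g : S → Int → Int → S)
    (hlen : xs.length ≤ ys.length) :
    ∀ (m k : Nat), m = xs.length - k → ∀ (init : S),
    (PySem.List.pyRange (k : Int) (xs.length : Int) 1).foldl
        (fun acc j => g acc (PySem.List.pyGetD xs j 0) (PySem.List.pyGetD ys j 0)) init
      = (((xs.drop k).zip (ys.drop k))).foldl (fun acc p => g acc p.1 p.2) init := by
  intro m
  induction m with
  | zero =>
    intro k hk init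
    have hk' : xs.length ≤ k := by omega
    rw [PySem.List.pyRange_one_eq_nil (by exact_mod_cast hk')]
    rw [List.drop_eq_nil_of_le hk']
    simp
  | succ n ih =>
    intro k hk init
    have hklt : k < xs.length := by omega
    have hkys : k < ys.length := by omega
    rw [PySem.List.pyRange_one_cons (by exact_mod_cast hklt)]
    rw [List.foldl_cons]
    have hx : PySem.List.pyGetD xs (k : Int) 0 = xs[k] := by
      simp [PySem.List.pyGetD_natCast, hklt]
    have hy : PySem.List.pyGetD ys (k : Int) 0 = ys[k] := by
      simp [PySem.List.pyGetD_natCast, hkys]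
    rw [hx, hy]
    have hcast : ((k : Int) + 1) = ((k + 1 : Nat) : Int) := by push_cast; ring
    rw [hcast, ih (k + 1) (by omega)]
    conv_rhs => rw [List.drop_eq_getElem_cons hklt, List.drop_eq_getElem_cons hkys]
    rw [List.zip_cons_cons, List.foldl_cons]

-- A's fused fold equals (prefix sums, reference fold over the zipped prefix table)
theorem pvMain (ar : List Int) : ∀ (sr : List Int), ar.length ≤ sr.length →
    ∀ (la lss le : Int) (As Ss Fs : List Int),
    ((ar.zip sr).foldl (fun acc p => pvStepA acc p.1 p.2) (la, lss, le, As, Ss, Fs)).2.2.2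
      = (As ++ pvPrefixes la ar,
         (((pvPrefixes la ar).zip sr).foldl pvStepR (le, Ss, Fs)).2.1,
         (((pvPrefixes la ar).zip sr).foldl pvStepR (le, Ss, Fs)).2.2) := by
  induction ar with
  | nil => intro sr _ la lss le As Ss Fs; simp [pvPrefixes]
  | cons a t ih =>
    intro sr hlen la lss le As Ss Fs
    match sr with
    | [] => simp at hlen
    | s :: u =>
      have hstepA : pvStepA (la, lss, le, As, Ss, Fs) a s
          = (la + a, max (la + a) le, max (la + a) le + s,
             As ++ [la + a], Ss ++ [max (la + a) le], Fs ++ [max (la + a) le + s]) := by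
        simp only [pvStepA]
        rw [show (if le ≤ a + la then a + la else le) = max (la + a) le from by
          rw [max_def]; split_ifs <;> omega]
        rw [show a + la = la + a from add_comm a la]
      have hstepR : pvStepR (le, Ss, Fs) (la + a, s)
          = (max (la + a) le + s, Ss ++ [max (la + a) le], Fs ++ [max (la + a) le + s]) := rfl
      simp only [pvPrefixes, List.zip_cons_cons, List.foldl_cons, hstepA, hstepR]
      rw [ih u (by simpa using hlen) (la + a) (max (la + a) le) (max (la + a) le + s)
        (As ++ [la + a]) (Ss ++ [max (la + a) le]) (Fs ++ [max (la + a) le + s])]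
      rw [List.append_cons]
      simp

-- the (start, finish) streams of the reference recursion, starting from last_end = le
def pvRun (le : Int) : List (Int × Int) → List Int × List Int
  | [] => ([], [])
  | p :: t =>
    (max p.1 le :: (pvRun (max p.1 le + p.2) t).1,
     (max p.1 le + p.2) :: (pvRun (max p.1 le + p.2) t).2)

theorem pvRun_fold (L : List (Int × Int)) : ∀ (le : Int) (Ss Fs : List Int),
    (L.foldl pvStepR (le, Ss, Fs)).2.1 = Ss ++ (pvRun le L).1 ∧
    (L.foldl pvStepR (le, Ss, Fs)).2.2 = Fs ++ (pvRun le L).2 := by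
  induction L with
  | nil => intro le Ss Fs; simp [pvRun]
  | cons p t ih =>
    intro le Ss Fs
    simp only [List.foldl_cons, pvStepR, pvRun]
    obtain ⟨h1, h2⟩ := ih (max p.1 le + p.2) (Ss ++ [max p.1 le]) (Fs ++ [max p.1 le + p.2])
    constructor
    · rw [h1]; simp
    · rw [h2]; simp

-- starts are finishes minus service times
theorem pvRun_sub (L : List (Int × Int)) : ∀ (le : Int),
    (pvRun le L).1 = ((pvRun le L).2.zip (L.map Prod.snd)).map (fun x => x.1 - x.2) := by
  induction L with
  | nil => intro le; simp [pvRun]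
  | cons p t ih =>
    intro le
    simp only [pvRun, List.map_cons, List.zip_cons_cons]
    rw [← ih (max p.1 le + p.2)]
    simp

theorem pvRun_length (L : List (Int × Int)) : ∀ le, (pvRun le L).2.length = L.length := by
  induction L with
  | nil => intro le; rfl
  | cons p t ih => intro le; simp [pvRun, ih]

-- B's (T, m) loop produces exactly the reference finishes, with last_end = T + m
theorem pvStepL_run (L : List (Int × Int)) : ∀ (T m : Int) (Fs : List Int),
    (L.foldl (fun acc p => pvStepL acc p.1 p.2) (T, m, Fs)).2.2 = Fs ++ (pvRun (T + m) L).2 := by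
  induction L with
  | nil => intro T m Fs; simp [pvRun]
  | cons p t ih =>
    intro T m Fs
    have h1 : T + p.2 + max m (p.1 - T) = max p.1 (T + m) + p.2 := by
      rw [max_def, max_def]; split_ifs <;> omega
    rw [List.foldl_cons]
    have hhead : pvStepL (T, m, Fs) p.1 p.2
        = (T + p.2, max m (p.1 - T), Fs ++ [T + p.2 + max m (p.1 - T)]) := rfl
    rw [hhead, ih (T + p.2) (max m (p.1 - T)) (Fs ++ [T + p.2 + max m (p.1 - T)])]
    simp only [pvRun]
    rw [h1]
    simp

-- second components of a zip with a longer list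
theorem pvSnd_zip (xs : List Int) : ∀ (ys : List Int), xs.length ≤ ys.length →
    (xs.zip ys).map Prod.snd = ys.take xs.length := by
  induction xs with
  | nil => intro ys h; simp
  | cons x t ih =>
    intro ys h
    match ys with
    | [] => simp at h
    | y :: u =>
      simp only [List.zip_cons_cons, List.map_cons, List.length_cons, List.take_succ_cons]
      rw [ih u (by simpa using h)]

-- zipping with a longer list may be truncated freely
theorem pvZip_take (xs : List Int) : ∀ (ys : List Int) (n : Nat), xs.length ≤ n →
    xs.zip (ys.take n) = xs.zip ys := by
  induction xs with
  | nil => intro ys n h; simp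
  | cons x t ih =>
    intro ys n h
    match ys, n with
    | [], _ => simp
    | y :: u, 0 => simp at h
    | y :: u, Nat.succ k =>
      simp only [List.take_succ_cons, List.zip_cons_cons]
      rw [ih u k (by simpa using h)]

-- the whole equivalence, stated over the proof-side step names (defeq to the ports)
theorem pvFinal (ar sr : List Int) (hpre : ar.length ≤ sr.length) :
    (((PySem.List.pyRange ((0 : Nat) : Int) (ar.length : Int) 1).foldl
        (fun acc n => pvStepA acc (PySem.List.pyGetD ar n 0) (PySem.List.pyGetD sr n 0))
        (0, 0, 0, [], [], [])).2.2.2.1,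
     ((PySem.List.pyRange ((0 : Nat) : Int) (ar.length : Int) 1).foldl
        (fun acc n => pvStepA acc (PySem.List.pyGetD ar n 0) (PySem.List.pyGetD sr n 0))
        (0, 0, 0, [], [], [])).2.2.2.2.1,
     ((PySem.List.pyRange ((0 : Nat) : Int) (ar.length : Int) 1).foldl
        (fun acc n => pvStepA acc (PySem.List.pyGetD ar n 0) (PySem.List.pyGetD sr n 0))
        (0, 0, 0, [], [], [])).2.2.2.2.2)
  = ((ar.foldl (fun (st : Int × List Int) r => (st.1 + r, st.2 ++ [st.1 + r])) (0, [])).2,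
     ((((PySem.List.pyRange ((0 : Nat) : Int)
            ((ar.foldl (fun (st : Int × List Int) r => (st.1 + r, st.2 ++ [st.1 + r])) (0, [])).2.length : Int) 1).foldl
        (fun acc k => pvStepL acc
          (PySem.List.pyGetD (ar.foldl (fun (st : Int × List Int) r => (st.1 + r, st.2 ++ [st.1 + r])) (0, [])).2 k 0)
          (PySem.List.pyGetD sr k 0))
        (0, 0, [])).2.2).zip sr).map (fun x => x.1 - x.2),
     ((PySem.List.pyRange ((0 : Nat) : Int)
            ((ar.foldl (fun (st : Int × List Int) r => (st.1 + r, st.2 ++ [st.1 + r])) (0, [])).2.length : Int) 1).foldl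
        (fun acc k => pvStepL acc
          (PySem.List.pyGetD (ar.foldl (fun (st : Int × List Int) r => (st.1 + r, st.2 ++ [st.1 + r])) (0, [])).2 k 0)
          (PySem.List.pyGetD sr k 0))
        (0, 0, [])).2.2) := by
  rw [pvPrefix_fold]
  simp only [List.nil_append]
  have hPlen : (pvPrefixes 0 ar).length = ar.length := pvPrefixes_length ar 0
  have hPsr : (pvPrefixes 0 ar).length ≤ sr.length := by omega
  rw [pvFold_range_two ar sr pvStepA hpre ar.length 0 (by omega)]
  rw [pvFold_range_two (pvPrefixes 0 ar) sr pvStepL hPsr (pvPrefixes 0 ar).length 0 (by omega)]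
  simp only [List.drop_zero]
  rw [pvMain ar sr hpre 0 0 0 [] [] []]
  obtain ⟨hS, hF⟩ := pvRun_fold ((pvPrefixes 0 ar).zip sr) 0 [] []
  have hL : (((pvPrefixes 0 ar).zip sr).foldl (fun acc p => pvStepL acc p.1 p.2)
      ((0 : Int), (0 : Int), ([] : List Int))).2.2 = (pvRun 0 ((pvPrefixes 0 ar).zip sr)).2 := by
    simpa using pvStepL_run ((pvPrefixes 0 ar).zip sr) 0 0 []
  rw [hS, hF, hL]
  simp only [List.nil_append]
  have hmap : (pvRun 0 ((pvPrefixes 0 ar).zip sr)).1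
      = ((pvRun 0 ((pvPrefixes 0 ar).zip sr)).2.zip sr).map (fun x => x.1 - x.2) := by
    rw [pvRun_sub]
    rw [pvSnd_zip _ _ hPsr]
    rw [pvZip_take]
    rw [pvRun_length, List.length_zip]
    omega
  rw [hmap]

-- ===== VERDICT (by name: the statement is the Claim_ definition above) =====
theorem calculate_arrival_service_per_C_spec : Claim_equal_calculate_arrival_service_per_C := by
  intro ar sr _ hpre
  exact pvFinal ar sr hpre
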